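-- pv_equiv track=rewrite | github.com/Amsterdam-Internships/Automatic-Answering-of-City-Council-Questions | src/text_generation/preprocess_ranking_results.py | get_top_results
-- ===== SOURCE A (Python) =====
-- def get_top_results(tfidf_results):
--     top_1 = []
--     top_5 = []
--     top_10 = []
--     for k in tfidf_results.keys():
--         counter = 0
--         to_append_5 = []
--         to_append_10 = []
--         for value in tfidf_results[k]:
--             if counter == 0:
--                 top_1.append(value[0])
--             elif counter <= 4:
--                 to_append_5.append(value[0])
--             elif counter <= 9:
--                 to_append_10.append(value[0])
--             else:
--                 break
--             counter += 1
--         top_5.append(to_append_5)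
--         top_10.append(to_append_10)
--     return top_1, top_5, top_10
-- ===== SOURCE B (Python) =====
-- def get_top_results(tfidf_results):
--     top_1 = []
--     top_5 = []
--     top_10 = []
--     for vals in tfidf_results.values():
--         if vals:
--             top_1.append(vals[0][0])
--         top_5.append([v[0] for v in vals[1:5]])
--         top_10.append([v[0] for v in vals[5:10]])
--     return top_1, top_5, top_10
-- ===== Notes on version B (the rewrite author's own statement) =====
-- stated objective: simpler
-- what changed: Replaced A's counter-driven if/elif/elif/break inner loop (with per-key lookup via .keys()) by direct iteration over .values() with the head element and the [1:5]/[5:10] slices taken directly, removing the running index and the break.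
import Mathlib
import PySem

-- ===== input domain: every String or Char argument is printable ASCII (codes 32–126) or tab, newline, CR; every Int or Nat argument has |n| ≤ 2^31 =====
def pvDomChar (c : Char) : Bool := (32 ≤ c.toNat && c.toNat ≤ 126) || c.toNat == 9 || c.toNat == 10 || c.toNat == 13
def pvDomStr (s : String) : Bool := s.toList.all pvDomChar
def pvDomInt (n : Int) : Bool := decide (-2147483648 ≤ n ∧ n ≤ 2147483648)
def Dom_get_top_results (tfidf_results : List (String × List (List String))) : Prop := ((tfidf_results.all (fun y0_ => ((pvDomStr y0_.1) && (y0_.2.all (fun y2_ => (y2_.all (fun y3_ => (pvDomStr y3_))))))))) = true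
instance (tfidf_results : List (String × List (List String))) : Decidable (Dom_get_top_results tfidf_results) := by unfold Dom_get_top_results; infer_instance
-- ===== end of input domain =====

-- B iterates dict.values() directly and takes the head and the [1:5]/[5:10] slices,
-- replacing A's counter-driven if/elif/elif/break classification (objective: simpler).


-- ===== PORT A =====
-- tfidf_results[k]: first-match lookup (Pre_ guarantees the key is present, getD [] never fires)
def aLookup (table : List (String × List (List String))) (k : String) : List (List String) :=
  ((table.find? (fun p => p.1 == k)).map Prod.snd).getD []

-- A's inner 'for value in tfidf_results[k]' loop with counter and break;
-- value[0] via pyGet? (IndexError = none excluded by Pre_, defaulted to "")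
def aInner (vals : List (List String)) (counter : Int)
    (top1 a5 a10 : List String) : List String × List String × List String :=
  match vals with
  | [] => (top1, a5, a10)
  | v :: rest =>
    if counter == 0 then
      aInner rest (counter + 1) (top1 ++ [(PySem.List.pyGet? v 0).getD ""]) a5 a10
    else if counter ≤ 4 then
      aInner rest (counter + 1) top1 (a5 ++ [(PySem.List.pyGet? v 0).getD ""]) a10
    else if counter ≤ 9 then
      aInner rest (counter + 1) top1 a5 (a10 ++ [(PySem.List.pyGet? v 0).getD ""])
    else (top1, a5, a10)   -- break

-- A's outer 'for k in tfidf_results.keys()' loop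
def aOuter (keys : List String) (table : List (String × List (List String)))
    (acc : List String × List (List String) × List (List String)) :
    List String × List (List String) × List (List String) :=
  match keys with
  | [] => acc
  | k :: ks =>
    let r := aInner (aLookup table k) 0 acc.1 [] []
    aOuter ks table (r.1, acc.2.1 ++ [r.2.1], acc.2.2 ++ [r.2.2])

-- dict.keys() of the association list = first-occurrence dedup of the keys
def get_top_results (tfidf_results : List (String × List (List String))) :
    List String × List (List String) × List (List String) :=
  aOuter (PySem.List.dedup (tfidf_results.map Prod.fst)) tfidf_results ([], [], [])

-- ===== PORT B =====
-- v[0] (IndexError = none excluded by Pre_, defaulted to "")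
def bFst (v : List String) : String := (PySem.List.pyGet? v 0).getD ""

-- one iteration of B's loop body over a value list
def bStep (acc : List String × List (List String) × List (List String))
    (vals : List (List String)) :
    List String × List (List String) × List (List String) :=
  let t1 := match vals with | [] => acc.1 | v :: _ => acc.1 ++ [bFst v]
  (t1, acc.2.1 ++ [(PySem.List.slice vals (some 1) (some 5)).map bFst],
       acc.2.2 ++ [(PySem.List.slice vals (some 5) (some 10)).map bFst])

-- 'for vals in tfidf_results.values()': exact for a dict (unique keys; Pre_ requires Nodup keys)
def get_top_results_alt (tfidf_results : List (String × List (List String))) :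
    List String × List (List String) × List (List String) :=
  (tfidf_results.map Prod.snd).foldl bStep ([], [], [])

-- ===== PRECONDITION & SPEC =====
-- Pre_ excludes (a) association lists with duplicate keys, which cannot arise from a Python
-- dict, and (b) inputs where some value list has an empty inner list among its first 10
-- entries, on which both A and B raise IndexError (value[0] / vals[...][0]).
def Pre_get_top_results (tfidf_results : List (String × List (List String))) : Prop :=
  (tfidf_results.map Prod.fst).Nodup ∧
  ∀ p ∈ tfidf_results, ∀ v ∈ p.2.take 10, v ≠ []
instance (tfidf_results : List (String × List (List String))) : Decidable (Pre_get_top_results tfidf_results) := by unfold Pre_get_top_results; infer_instance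

def pvWitness_get_top_results : (List (String × List (List String))) :=
  [("a", [["x", "y"], ["z"]]), ("b", [])]

def Spec_get_top_results (tfidf_results : List (String × List (List String))) (out : List String × List (List String) × List (List String)) : Prop := out = get_top_results_alt tfidf_results
instance (tfidf_results : List (String × List (List String))) (out : List String × List (List String) × List (List String)) : Decidable (Spec_get_top_results tfidf_results out) := by unfold Spec_get_top_results; infer_instance

-- ===== CLAIM (what is proved, stated in full; the proofs are below) =====
def Claim_equal_get_top_results : Prop := ∀ (tfidf_results : List (String × List (List String))), Dom_get_top_results tfidf_results → Pre_get_top_results tfidf_results → Spec_get_top_results tfidf_results (get_top_results tfidf_results)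

-- ===== LEMMAS AND PROOFS =====

-- A's inner loop, started fresh, yields the head element and the two slices of B
theorem aInner_eq (vals : List (List String)) (t1 : List String) :
    aInner vals 0 t1 [] [] =
      ((match vals with | [] => t1 | v :: _ => t1 ++ [bFst v]),
       (PySem.List.slice vals (some 1) (some 5)).map bFst,
       (PySem.List.slice vals (some 5) (some 10)).map bFst) := by
  rw [PySem.List.slice_toNat vals (by norm_num) (by norm_num),
      PySem.List.slice_toNat vals (by norm_num) (by norm_num)]
  rcases vals with _ | ⟨v0, _ | ⟨v1, _ | ⟨v2, _ | ⟨v3, _ | ⟨v4, _ | ⟨v5, _ | ⟨v6, _ | ⟨v7, _ | ⟨v8, _ | ⟨v9, _ | ⟨v10, rest⟩⟩⟩⟩⟩⟩⟩⟩⟩⟩⟩ <;>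
    simp [aInner, bFst]

-- lookup skips an entry whose key occurs in none of the remaining keys
theorem aOuter_skip (keys : List String) (p : String × List (List String))
    (table : List (String × List (List String)))
    (acc : List String × List (List String) × List (List String))
    (h : ∀ k ∈ keys, k ≠ p.1) :
    aOuter keys (p :: table) acc = aOuter keys table acc := by
  induction keys generalizing acc with
  | nil => rfl
  | cons k ks ih =>
    have hk : k ≠ p.1 := h k (List.mem_cons_self ..)
    have hpk : (p.1 == k) = false := by simp; exact fun hpk => hk hpk.symm
    have hfind : (p :: table).find? (fun q => q.1 == k) = table.find? (fun q => q.1 == k) := by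
      simp [List.find?, hpk]
    simp only [aOuter, aLookup, hfind]
    exact ih _ (fun x hx => h x (List.mem_cons_of_mem _ hx))

theorem aOuter_eq_foldl (xs : List (String × List (List String)))
    (acc : List String × List (List String) × List (List String))
    (h : (xs.map Prod.fst).Nodup) :
    aOuter (xs.map Prod.fst) xs acc = (xs.map Prod.snd).foldl bStep acc := by
  induction xs generalizing acc with
  | nil => rfl
  | cons x rest ih =>
    simp only [List.map_cons, List.nodup_cons, List.mem_map] at h
    simp only [List.map_cons, List.foldl_cons, aOuter, aLookup, List.find?,
      BEq.rfl, Option.map_some, Option.getD_some]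
    rw [aInner_eq, aOuter_skip _ _ _ _ (by
      intro k hk hkx
      exact h.1 ⟨_, (List.mem_map.mp hk).choose_spec.1, by
        rw [(List.mem_map.mp hk).choose_spec.2, hkx]⟩)]
    rw [ih _ h.2]
    congr 1

theorem foldl_add_nodup (xs acc : List String) (h : (acc ++ xs).Nodup) :
    List.foldl PySem.Set.add acc xs = acc ++ xs := by
  induction xs generalizing acc with
  | nil => simp
  | cons x rest ih =>
    have hx : x ∉ acc := fun hm =>
      (List.disjoint_of_nodup_append h) hm (List.mem_cons_self ..)
    have hadd : PySem.Set.add acc x = acc ++ [x] := by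
      simp [PySem.Set.add, PySem.Set.contains, hx]
    rw [List.foldl_cons, hadd, ih (acc ++ [x]) (by simpa using h)]
    simp

theorem dedup_nodup (xs : List String) (h : xs.Nodup) : PySem.List.dedup xs = xs := by
  simpa using foldl_add_nodup xs [] (by simpa using h)

-- ===== VERDICT (by name: the statement is the Claim_ definition above) =====
theorem get_top_results_spec : Claim_equal_get_top_results := by
  intro xs _ hpre
  unfold Spec_get_top_results get_top_results get_top_results_alt
  rw [dedup_nodup _ hpre.1, aOuter_eq_foldl _ _ hpre.1]
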